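-- pv_equiv track=rewrite | github.com/apexneuralecosystems/Legal-Ops | backend/agents/devils_advocate_agent.py | _parse_components
-- ===== SOURCE A (Python) =====
-- from typing import Dict, Any, List, Optional
--
-- def _parse_components(text: str) -> Dict[str, str]:
--     """Extract individual components from the analysis."""
--     components = {}
--
--     markers = [
--         ("defenses", "CONTRACTUAL DEFENSES TABLE"),
--         ("evidentiary_gaps", "EVIDENTIARY GAPS"),
--         ("cross_examination", "CROSS-EXAMINATION QUESTIONS"),
--         ("recommendations", "STRATEGIC RECOMMENDATIONS"),
--         ("opposing_strategy", "OPPOSING COUNSEL'S LIKELY STRATEGY"),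
--     ]
--
--     for key, marker in markers:
--         start_idx = text.find(marker)
--         if start_idx != -1:
--             # Find next marker or end
--             next_idx = len(text)
--             for _, next_marker in markers:
--                 if next_marker != marker:
--                     idx = text.find(next_marker, start_idx + len(marker))
--                     if idx != -1 and idx < next_idx:
--                         next_idx = idx
--
--             components[key] = text[start_idx:next_idx].strip()
--
--     return components
-- ===== SOURCE B (Python) =====
-- def _parse_components(text: str) -> dict:
--     """Extract individual components from the analysis."""
--     markers = [
--         ("defenses", "CONTRACTUAL DEFENSES TABLE"),
--         ("evidentiary_gaps", "EVIDENTIARY GAPS"),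
--         ("cross_examination", "CROSS-EXAMINATION QUESTIONS"),
--         ("recommendations", "STRATEGIC RECOMMENDATIONS"),
--         ("opposing_strategy", "OPPOSING COUNSEL'S LIKELY STRATEGY"),
--     ]
--
--     n = len(text)
--     # One scan over all positions: a position-sorted index of every marker occurrence.
--     events = []
--     for i in range(n + 1):
--         for _, m in markers:
--             if text[i:i + len(m)] == m:
--                 events.append((i, m))
--
--     components = {}
--     for key, marker in markers:
--         starts = [p for p, m in events if m == marker]
--         if starts:
--             s = starts[0]
--             thr = s + len(marker)
--             end = next((p for p, m in events if m != marker and p >= thr), n)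
--             components[key] = text[s:end].strip()
--     return components
-- ===== Notes on version B (the rewrite author's own statement) =====
-- stated objective: alternative
-- what changed: Replaces the nested repeated text.find rescans with a single scan that builds one position-sorted index of all marker occurrences, from which each section's start (first occurrence) and end (first later occurrence of a different marker) are read off.
import Mathlib
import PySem

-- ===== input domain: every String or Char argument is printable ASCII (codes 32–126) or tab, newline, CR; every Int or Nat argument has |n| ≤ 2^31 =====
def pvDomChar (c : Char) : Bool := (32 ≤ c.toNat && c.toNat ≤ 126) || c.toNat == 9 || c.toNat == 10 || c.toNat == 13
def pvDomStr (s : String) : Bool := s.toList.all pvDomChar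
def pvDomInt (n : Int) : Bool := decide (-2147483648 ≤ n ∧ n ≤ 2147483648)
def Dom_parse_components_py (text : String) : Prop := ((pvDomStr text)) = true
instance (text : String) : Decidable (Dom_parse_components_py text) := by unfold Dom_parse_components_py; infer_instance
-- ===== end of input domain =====

-- B replaces A's nested repeated text.find rescans by one scan building a position-sorted
-- index of every marker occurrence, then reads each section's start and end off that index
-- (objective: alternative decomposition, same results; no speed claim).


-- ===== PORT A =====
-- the shared literal marker table
def pvMarkers : List (String × String) :=
  [("defenses", "CONTRACTUAL DEFENSES TABLE"),
   ("evidentiary_gaps", "EVIDENTIARY GAPS"),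
   ("cross_examination", "CROSS-EXAMINATION QUESTIONS"),
   ("recommendations", "STRATEGIC RECOMMENDATIONS"),
   ("opposing_strategy", "OPPOSING COUNSEL'S LIKELY STRATEGY")]

def parse_components_py (text : String) : List (String × String) :=
  let markers := pvMarkers
  let components : PySem.Dict String String :=
    markers.foldl (fun components km =>
      let key := km.1
      let marker := km.2
      let start_idx := PySem.Str.find text marker
      if start_idx ≠ -1 then
        let next_idx : Int :=
          markers.foldl (fun next_idx km' =>
            let next_marker := km'.2
            if next_marker ≠ marker then
              let idx := PySem.Str.findFrom text next_marker (start_idx + (PySem.Str.len marker : Int))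
              if idx ≠ -1 ∧ idx < next_idx then idx else next_idx
            else next_idx) ((PySem.Str.len text : Int))
        components.insert key (PySem.Str.strip (PySem.Str.slice text (some start_idx) (some next_idx)))
      else components) PySem.Dict.empty
  components.items

-- ===== PORT B =====
def parse_components_py_alt (text : String) : List (String × String) :=
  let markers := pvMarkers
  let n := PySem.Str.len text
  -- one scan over all positions: position-sorted index of every marker occurrence
  let events : List (Int × String) :=
    (PySem.List.pyRange 0 (n + 1)).foldl (fun evs i =>
      markers.foldl (fun evs km =>
        let m := km.2
        if PySem.Str.slice text (some i) (some (i + PySem.Str.len m)) = m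
        then evs ++ [(i, m)] else evs) evs) []
  let components : PySem.Dict String String :=
    markers.foldl (fun components km =>
      let key := km.1
      let marker := km.2
      let starts := (events.filter (fun e => e.2 = marker)).map (·.1)
      match starts with
      | [] => components
      | s :: _ =>
        let thr := s + PySem.Str.len marker
        let endv := ((events.find? (fun e => e.2 ≠ marker ∧ thr ≤ e.1)).map (·.1)).getD n
        components.insert key
          (PySem.Str.strip (PySem.Str.slice text (some s) (some endv)))
      ) PySem.Dict.empty
  components.items

-- ===== PRECONDITION & SPEC =====
def Spec_parse_components_py (text : String) (out : List (String × String)) : Prop := out = parse_components_py_alt text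
instance (text : String) (out : List (String × String)) : Decidable (Spec_parse_components_py text out) := by unfold Spec_parse_components_py; infer_instance

-- ===== CLAIM (what is proved, stated in full; the proofs are below) =====
def Claim_equal_parse_components_py : Prop := ∀ (text : String), Dom_parse_components_py text → Spec_parse_components_py text (parse_components_py text)

-- ===== LEMMAS AND PROOFS =====

-- ===== generic helpers =====
theorem range_find?_some {N k : ℕ} {q : ℕ → Bool} :
    (List.range N).find? q = some k ↔ (k < N ∧ q k ∧ ∀ j < k, ¬ q j) := by
  rw [List.find?_eq_some_iff_getElem]
  simp only [List.getElem_range, List.length_range, Bool.not_eq_eq_eq_not, Bool.not_true]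
  constructor
  · rintro ⟨hq, i, hi, rfl, hmin⟩
    exact ⟨hi, hq, fun j hj => by simpa using hmin j hj⟩
  · rintro ⟨hk, hq, hmin⟩
    exact ⟨hq, k, hk, rfl, fun j hj => by simpa using hmin j hj⟩

theorem range_find?_none {N : ℕ} {q : ℕ → Bool} :
    (List.range N).find? q = none ↔ ∀ j < N, ¬ q j := by
  rw [List.find?_eq_none]; simp

theorem range_find?_congr {N : ℕ} {q1 q2 : ℕ → Bool} (h : ∀ j < N, q1 j = q2 j) :
    (List.range N).find? q1 = (List.range N).find? q2 := by
  cases hf : (List.range N).find? q2 with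
  | none =>
    rw [range_find?_none] at hf ⊢
    intro j hj; rw [h j hj]; exact hf j hj
  | some k =>
    rw [range_find?_some] at hf ⊢
    exact ⟨hf.1, by rw [h k hf.1]; exact hf.2.1, fun j hj => by
      rw [h j (lt_trans hj hf.1)]; exact hf.2.2 j hj⟩

theorem find?_flatMap {α β : Type} (l : List α) (g : α → List β) (p : β → Bool) :
    (l.flatMap g).find? p = l.findSome? (fun a => (g a).find? p) := by
  induction l with
  | nil => rfl
  | cons a l ih =>
    rw [List.flatMap_cons, List.find?_append, List.findSome?_cons, ih]
    cases (g a).find? p <;> rfl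

theorem findSome?_guard {α β : Type} (l : List α) (c : α → Bool) (v : α → β) :
    l.findSome? (fun a => if c a then some (v a) else none) = (l.find? c).map v := by
  induction l with
  | nil => rfl
  | cons a l ih =>
    rw [List.findSome?_cons, List.find?_cons]
    by_cases h : c a <;> simp [h, ih]

theorem findSome?_option_map {α β γ : Type} (l : List α) (f : α → Option β) (g : β → γ) :
    (l.findSome? f).map g = l.findSome? (fun a => (f a).map g) := by
  induction l with
  | nil => rfl
  | cons a l ih =>
    rw [List.findSome?_cons, List.findSome?_cons]
    cases f a <;> simp [ih]

-- find / findFrom as first match over the position range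
theorem chars_find_eq (cs mm : List Char) :
    PySem.Chars.find cs mm =
      (match (List.range (cs.length + 1)).find? (fun i => decide (mm <+: cs.drop i)) with
       | some k => (k : Int)
       | none => -1) := by
  by_cases hpos : 0 ≤ PySem.Chars.find cs mm
  · obtain ⟨hpre, hmin⟩ := PySem.Chars.find_spec hpos
    have hle : (PySem.Chars.find cs mm).toNat ≤ cs.length := by
      have := PySem.Chars.find_le_length cs mm; omega
    have : (List.range (cs.length + 1)).find? (fun i => decide (mm <+: cs.drop i))
        = some (PySem.Chars.find cs mm).toNat := by
      rw [range_find?_some]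
      exact ⟨by omega, by simpa using hpre, fun j hj => by simpa using hmin j hj⟩
    rw [this]; simp; omega
  · have hm1 : PySem.Chars.find cs mm = -1 := by
      have := PySem.Chars.neg_one_le_find cs mm; omega
    have hninf : ¬ mm <:+: cs := (PySem.Chars.find_eq_neg_one_iff cs mm).mp hm1
    have : (List.range (cs.length + 1)).find? (fun i => decide (mm <+: cs.drop i)) = none := by
      rw [range_find?_none]
      intro j _ hj
      exact hninf (by
        rw [← PySem.Chars.isIn_iff_infix, ← PySem.Chars.exists_prefix_drop_iff_isIn]
        exact ⟨j, by simpa using hj⟩)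
    rw [this, hm1]

theorem chars_findFrom_eq (cs mm : List Char) (k : ℕ) (hk : k ≤ cs.length) :
    PySem.Chars.findFrom cs mm (k : Int) =
      (match (List.range (cs.length + 1)).find? (fun i => decide (k ≤ i) && decide (mm <+: cs.drop i)) with
       | some j => (j : Int)
       | none => -1) := by
  by_cases hf : PySem.Chars.findFrom cs mm (k : Int) = -1
  · have hninf : ¬ mm <:+: List.drop k cs :=
      (PySem.Chars.findFrom_natCast_eq_neg_one_iff cs mm k hk).mp hf
    have : (List.range (cs.length + 1)).find? (fun i => decide (k ≤ i) && decide (mm <+: cs.drop i)) = none := by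
      rw [range_find?_none]
      intro j _ hj
      simp only [Bool.and_eq_true, decide_eq_true_eq] at hj
      apply hninf
      rw [← PySem.Chars.isIn_iff_infix, ← PySem.Chars.exists_prefix_drop_iff_isIn]
      refine ⟨j - k, ?_⟩
      rw [List.drop_drop]
      have : k + (j - k) = j := by omega
      rw [this]; exact hj.2
    rw [this, hf]
  · obtain ⟨hge, hpre, hmin⟩ := PySem.Chars.findFrom_natCast_spec cs mm k hk hf
    set v := PySem.Chars.findFrom cs mm (k : Int) with hv
    have hv0 : 0 ≤ v := le_trans (by positivity) hge
    have hkv : k ≤ v.toNat := by omega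
    have hvle : v.toNat ≤ cs.length := by
      by_cases hmme : mm = []
      · subst hmme
        have : v.toNat ≤ k := by
          by_contra hgt
          exact hmin k le_rfl (by omega) (List.nil_prefix)
        omega
      · have h1 : mm.length ≤ (cs.drop v.toNat).length := hpre.length_le
        have h2 : 0 < mm.length := List.length_pos_iff.mpr hmme
        simp [List.length_drop] at h1
        omega
    have : (List.range (cs.length + 1)).find? (fun i => decide (k ≤ i) && decide (mm <+: cs.drop i))
        = some v.toNat := by
      rw [range_find?_some]
      refine ⟨by omega, by simp [hkv, hpre], fun j hj => ?_⟩
      simp only [Bool.and_eq_true, decide_eq_true_eq, not_and]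
      intro hkj
      exact hmin j hkj hj
    rw [this]; simp; omega

-- the per-position events of B's index
def pvEvAt (cs : List Char) (markers : List (String × String)) (i : ℕ) : List (Int × String) :=
  (markers.filter (fun km => decide (km.2.toList <+: cs.drop i))).map (fun km => ((i : Int), km.2))

theorem pvSlice_cond (text : String) (m : String) (i : ℕ) :
    (PySem.Str.slice text (some (i : Int)) (some ((i : Int) + PySem.Str.len m)) = m)
      ↔ m.toList <+: text.toList.drop i := by
  rw [PySem.Str.len_eq]
  constructor
  · intro h
    have := congrArg String.toList h
    rw [PySem.Str.toList_slice, PySem.Chars.slice_eq_listSlice,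
        PySem.List.slice_natCast_add] at this
    rw [List.prefix_iff_eq_take]
    rw [← this]
    congr 1
    rw [← this]
    simp
  · intro h
    have htake : List.take m.toList.length (List.drop i text.toList) = m.toList := by
      rw [List.prefix_iff_eq_take] at h; exact h.symm
    apply String.toList_inj.mp
    rw [PySem.Str.toList_slice, PySem.Chars.slice_eq_listSlice,
        PySem.List.slice_natCast_add, htake]

theorem events_eq (text : String) (markers : List (String × String)) :
    (PySem.List.pyRange 0 (PySem.Str.len text + 1)).foldl (fun evs i =>
        markers.foldl (fun evs km =>
          if PySem.Str.slice text (some i) (some (i + PySem.Str.len km.2)) = km.2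
          then evs ++ [(i, km.2)] else evs) evs) ([] : List (Int × String))
      = (List.range (text.toList.length + 1)).flatMap (pvEvAt text.toList markers) := by
  have hr : PySem.Str.len text + 1 = ((text.toList.length + 1 : ℕ) : Int) := by
    rw [PySem.Str.len_eq]; push_cast; ring
  have hstep : ∀ (evs : List (Int × String)) (i : ℕ),
      markers.foldl (fun evs km =>
        if PySem.Str.slice text (some (i:Int)) (some ((i:Int) + PySem.Str.len km.2)) = km.2
        then evs ++ [((i:Int), km.2)] else evs) evs
      = evs ++ pvEvAt text.toList markers i := by
    intro evs i
    unfold pvEvAt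
    rw [PySem.List.foldl_congr_mem markers _
      (fun evs km => if decide (km.2.toList <+: text.toList.drop i) = true
        then evs ++ [((i:Int), km.2)] else evs) evs ?_]
    · exact PySem.List.foldl_append_if _ _ markers evs
    · intro acc km _
      by_cases h : km.2.toList <+: text.toList.drop i
      · simp only [h, decide_true, if_true, if_pos ((pvSlice_cond text km.2 i).mpr h)]
      · simp only [h, decide_false, Bool.false_eq_true, if_false,
          if_neg (fun hc => h ((pvSlice_cond text km.2 i).mp hc))]
  rw [hr, PySem.List.pyRange_zero_natCast, List.foldl_map,
      PySem.List.foldl_congr_mem _ _ (fun evs i => evs ++ pvEvAt text.toList markers i) []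
        (fun acc i _ => hstep acc i),
      PySem.List.foldl_append_eq_flatMap]
  simp

def pvOthOcc (cs : List Char) (markers : List (String × String)) (m : String) (i : ℕ) : Bool :=
  markers.any (fun km => decide (km.2 ≠ m) && decide (km.2.toList <+: cs.drop i))

theorem evAt_find?_self (cs : List Char) (markers : List (String × String)) (k m : String)
    (hmem : (k, m) ∈ markers) (i : ℕ) :
    (pvEvAt cs markers i).find? (fun e => decide (e.2 = m))
      = if m.toList <+: cs.drop i then some ((i : Int), m) else none := by
  unfold pvEvAt
  rw [List.find?_map]
  by_cases h : m.toList <+: cs.drop i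
  · rw [if_pos h]
    cases hf : (markers.filter (fun km => decide (km.2.toList <+: cs.drop i))).find?
        ((fun e => decide (e.2 = m)) ∘ (fun km => ((i : Int), km.2))) with
    | none =>
      exfalso
      rw [List.find?_eq_none] at hf
      exact absurd (by simp : decide ((((i:Int)), m).2 = m) = true)
        (by simpa using hf (k, m) (List.mem_filter.mpr ⟨hmem, by simpa using h⟩))
    | some km' =>
      have := List.find?_some hf
      simp only [Function.comp_apply, decide_eq_true_eq] at this
      simp [this]
  · rw [if_neg h]
    rw [Option.map_eq_none_iff, List.find?_eq_none]
    intro km' hkm'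
    have := (List.mem_filter.mp hkm').2
    simp only [Function.comp_apply, decide_eq_true_eq] at this ⊢
    intro heq
    rw [heq] at this
    exact h (by simpa using this)

theorem evAt_find?_other (cs : List Char) (markers : List (String × String)) (m : String)
    (thr : Int) (i : ℕ) :
    ((pvEvAt cs markers i).find? (fun e => decide (e.2 ≠ m ∧ thr ≤ e.1))).map (·.1)
      = if decide (thr ≤ (i : Int)) && pvOthOcc cs markers m i then some ((i : Int)) else none := by
  unfold pvEvAt pvOthOcc
  rw [List.find?_map, Option.map_map]
  by_cases hthr : thr ≤ (i : Int)
  · by_cases hocc : ∃ km ∈ markers, km.2 ≠ m ∧ km.2.toList <+: cs.drop i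
    · obtain ⟨km0, hkm0, hne0, hpre0⟩ := hocc
      have hany : (markers.any (fun km => decide (km.2 ≠ m) && decide (km.2.toList <+: cs.drop i))) = true :=
        List.any_eq_true.mpr ⟨km0, hkm0, by simp [hne0, hpre0]⟩
      rw [if_pos (by rw [decide_eq_true hthr, hany]; rfl)]
      cases hf : (markers.filter (fun km => decide (km.2.toList <+: cs.drop i))).find?
          ((fun e => decide (e.2 ≠ m ∧ thr ≤ e.1)) ∘ (fun km => ((i : Int), km.2))) with
      | none =>
        exfalso
        rw [List.find?_eq_none] at hf
        have := hf km0 (List.mem_filter.mpr ⟨hkm0, by simpa using hpre0⟩)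
        simp only [Function.comp_apply, decide_eq_true_eq, not_and] at this
        exact absurd hthr (this hne0)
      | some km' => rfl
    · have hf : (markers.filter (fun km => decide (km.2.toList <+: cs.drop i))).find?
          ((fun e => decide (e.2 ≠ m ∧ thr ≤ e.1)) ∘ (fun km => ((i : Int), km.2))) = none := by
        rw [List.find?_eq_none]
        intro km hkm
        have hmem := List.mem_filter.mp hkm
        simp only [Function.comp_apply, decide_eq_true_eq, not_and]
        intro hne
        exact absurd ⟨km, hmem.1, hne, by simpa using hmem.2⟩ hocc
      have hany : (markers.any (fun km => decide (km.2 ≠ m) && decide (km.2.toList <+: cs.drop i))) = false := by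
        rw [List.any_eq_false]
        intro km hkm
        simp only [Bool.and_eq_true, decide_eq_true_eq, not_and]
        intro hne hpre
        exact hocc ⟨km, hkm, hne, hpre⟩
      rw [hf, if_neg (by rw [hany, Bool.and_false]; simp)]
      rfl
  · have hf : (markers.filter (fun km => decide (km.2.toList <+: cs.drop i))).find?
        ((fun e => decide (e.2 ≠ m ∧ thr ≤ e.1)) ∘ (fun km => ((i : Int), km.2))) = none := by
      rw [List.find?_eq_none]
      intro km _
      simp only [Function.comp_apply, decide_eq_true_eq, not_and]
      exact fun _ => hthr
    rw [hf, if_neg (by rw [decide_eq_false hthr, Bool.false_and]; simp)]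
    rfl

theorem findSome?_guardP {α β : Type} (l : List α) (c : α → Prop) [DecidablePred c] (v : α → β) :
    l.findSome? (fun a => if c a then some (v a) else none) = (l.find? (fun a => decide (c a))).map v := by
  induction l with
  | nil => rfl
  | cons a l ih =>
    rw [List.findSome?_cons, List.find?_cons]
    by_cases h : c a <;> simp [h, ih]

theorem range_find?_or_some_none {N k : ℕ} {q1 q2 : ℕ → Bool}
    (h1 : (List.range N).find? q1 = some k) (h2 : (List.range N).find? q2 = none) :
    (List.range N).find? (fun j => q1 j || q2 j) = some k := by
  rw [range_find?_some] at h1 ⊢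
  rw [range_find?_none] at h2
  refine ⟨h1.1, by simp [h1.2.1], fun j hj => ?_⟩
  simp only [Bool.or_eq_true, not_or]
  exact ⟨h1.2.2 j hj, h2 j (lt_trans hj h1.1)⟩

theorem range_find?_or_some_some {N k1 k2 : ℕ} {q1 q2 : ℕ → Bool}
    (h1 : (List.range N).find? q1 = some k1) (h2 : (List.range N).find? q2 = some k2) :
    (List.range N).find? (fun j => q1 j || q2 j) = some (min k1 k2) := by
  rw [range_find?_some] at h1 h2 ⊢
  refine ⟨by omega, ?_, fun j hj => ?_⟩
  · rcases le_total k1 k2 with h | h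
    · simp [min_eq_left h, h1.2.1]
    · simp [min_eq_right h, h2.2.1]
  · simp only [Bool.or_eq_true, not_or]
    exact ⟨h1.2.2 j (by omega), h2.2.2 j (by omega)⟩

def pvMinFind (a : ℕ) (o : Option ℕ) : ℕ := match o with | none => a | some j => min a j

theorem A_fold (cs : List Char) (m : String) (thrN : ℕ) (hthr : thrN ≤ cs.length)
    (l : List (String × String)) :
    ∀ (a : ℕ), a ≤ cs.length →
    (l.foldl (fun next km' =>
        if km'.2 ≠ m then
          (if PySem.Chars.findFrom cs km'.2.toList ((thrN : ℕ) : Int) ≠ -1 ∧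
              PySem.Chars.findFrom cs km'.2.toList ((thrN : ℕ) : Int) < next
           then PySem.Chars.findFrom cs km'.2.toList ((thrN : ℕ) : Int) else next)
        else next) ((a : ℕ) : Int))
      = ((pvMinFind a ((List.range (cs.length + 1)).find? (fun j => decide (thrN ≤ j) &&
          l.any (fun km' => decide (km'.2 ≠ m) && decide (km'.2.toList <+: cs.drop j)))) : ℕ) : Int) := by
  induction l with
  | nil =>
    intro a _
    have : (List.range (cs.length + 1)).find? (fun j => decide (thrN ≤ j) &&
        ([] : List (String × String)).any (fun km' => decide (km'.2 ≠ m) && decide (km'.2.toList <+: cs.drop j))) = none := by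
      rw [range_find?_none]; intro j _; simp
    rw [List.foldl_nil, this]; rfl
  | cons km' l ih =>
    intro a ha
    rw [List.foldl_cons]
    by_cases hne : km'.2 ≠ m
    · rw [if_pos hne]
      have hff := chars_findFrom_eq cs km'.2.toList thrN hthr
      cases hfk : (List.range (cs.length + 1)).find?
          (fun i => decide (thrN ≤ i) && decide (km'.2.toList <+: cs.drop i)) with
      | none =>
        rw [hfk] at hff
        simp only [hff] at *
        rw [if_neg (by simp)]
        rw [ih a ha]
        congr 2
        apply range_find?_congr
        intro j hj
        have hq := range_find?_none.mp hfk j hj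
        simp only [Bool.and_eq_true, decide_eq_true_eq, not_and] at hq
        simp only [List.any_cons]
        by_cases h1 : thrN ≤ j
        · by_cases h2 : km'.2.toList <+: cs.drop j
          · exact absurd h2 (hq h1)
          · simp [h2]
        · simp [h1]
      | some kk =>
        rw [hfk] at hff
        simp only [hff] at *
        obtain ⟨hkN, hqk, hmink⟩ := range_find?_some.mp hfk
        simp only [Bool.and_eq_true, decide_eq_true_eq] at hqk
        have hstep : (if ((kk : Int) ≠ -1 ∧ (kk : Int) < ((a : ℕ) : Int)) then ((kk : Int)) else ((a : ℕ) : Int))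
            = (((min a kk : ℕ) : Int)) := by
          split_ifs with h <;> omega
        rw [hstep, ih (min a kk) (le_trans (min_le_left _ _) ha)]
        congr 1
        -- combine the head marker's find? with the tail's
        cases hfl : (List.range (cs.length + 1)).find? (fun j => decide (thrN ≤ j) &&
            l.any (fun km'' => decide (km''.2 ≠ m) && decide (km''.2.toList <+: cs.drop j))) with
        | none =>
          have hcons : (List.range (cs.length + 1)).find? (fun j => decide (thrN ≤ j) &&
              (km' :: l).any (fun km'' => decide (km''.2 ≠ m) && decide (km''.2.toList <+: cs.drop j))) = some kk := by
            have := range_find?_or_some_none (N := cs.length + 1)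
              (q1 := fun i => decide (thrN ≤ i) && decide (km'.2.toList <+: cs.drop i))
              (q2 := fun j => decide (thrN ≤ j) &&
                l.any (fun km'' => decide (km''.2 ≠ m) && decide (km''.2.toList <+: cs.drop j))) hfk hfl
            rw [← this]
            apply range_find?_congr
            intro j _
            simp only [List.any_cons]
            by_cases h1 : thrN ≤ j <;> by_cases h2 : km'.2.toList <+: cs.drop j <;>
              simp [h1, h2, hne]
          rw [hcons]
          simp [pvMinFind]
        | some k2 =>
          have hcons : (List.range (cs.length + 1)).find? (fun j => decide (thrN ≤ j) &&
              (km' :: l).any (fun km'' => decide (km''.2 ≠ m) && decide (km''.2.toList <+: cs.drop j))) = some (min kk k2) := by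
            have := range_find?_or_some_some (N := cs.length + 1)
              (q1 := fun i => decide (thrN ≤ i) && decide (km'.2.toList <+: cs.drop i))
              (q2 := fun j => decide (thrN ≤ j) &&
                l.any (fun km'' => decide (km''.2 ≠ m) && decide (km''.2.toList <+: cs.drop j))) hfk hfl
            rw [← this]
            apply range_find?_congr
            intro j _
            simp only [List.any_cons]
            by_cases h1 : thrN ≤ j <;> by_cases h2 : km'.2.toList <+: cs.drop j <;>
              simp [h1, h2, hne]
          rw [hcons]
          simp only [pvMinFind]
          omega
    · rw [if_neg hne]
      rw [ih a ha]
      congr 2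
      apply range_find?_congr
      intro j _
      simp only [List.any_cons]
      have : decide (km'.2 ≠ m) = false := by simpa using hne
      simp [this]

theorem EV_find?_self (cs : List Char) (markers : List (String × String)) (k m : String)
    (hmem : (k, m) ∈ markers) :
    ((List.range (cs.length + 1)).flatMap (pvEvAt cs markers)).find? (fun e => decide (e.2 = m))
      = ((List.range (cs.length + 1)).find? (fun i => decide (m.toList <+: cs.drop i))).map
          (fun i => (((i : ℕ) : Int), m)) := by
  rw [find?_flatMap]
  have h : (fun i => (pvEvAt cs markers i).find? (fun e => decide (e.2 = m)))
      = (fun i => if m.toList <+: cs.drop i then some (((i : ℕ) : Int), m) else none) :=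
    funext (evAt_find?_self cs markers k m hmem)
  rw [h, findSome?_guardP]

theorem EV_find?_other (cs : List Char) (markers : List (String × String)) (m : String) (thr : Int) :
    (((List.range (cs.length + 1)).flatMap (pvEvAt cs markers)).find?
        (fun e => decide (e.2 ≠ m ∧ thr ≤ e.1))).map (·.1)
      = ((List.range (cs.length + 1)).find?
          (fun i => decide (thr ≤ ((i : ℕ) : Int)) && pvOthOcc cs markers m i)).map
          (fun i => ((i : ℕ) : Int)) := by
  rw [find?_flatMap, findSome?_option_map]
  have h : (fun i => ((pvEvAt cs markers i).find? (fun e => decide (e.2 ≠ m ∧ thr ≤ e.1))).map (·.1))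
      = (fun i => if decide (thr ≤ ((i : ℕ) : Int)) && pvOthOcc cs markers m i
                  then some ((i : ℕ) : Int) else none) :=
    funext (evAt_find?_other cs markers m thr)
  rw [h, findSome?_guard]

theorem ab_eq (text : String) : parse_components_py text = parse_components_py_alt text := by
  simp only [parse_components_py, parse_components_py_alt]
  rw [events_eq text pvMarkers]
  refine congrArg PySem.Dict.items ?_
  apply PySem.List.foldl_congr_mem
  intro d km hmem
  obtain ⟨k, m⟩ := km
  dsimp only
  cases hF : (List.range (text.toList.length + 1)).find?
      (fun i => decide (m.toList <+: text.toList.drop i)) with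
  | none =>
    have hfind : PySem.Str.find text m = -1 := by
      rw [PySem.Str.find_eq, chars_find_eq, hF]
    have hfil : (List.filter (fun e => decide (e.2 = m))
        (List.flatMap (pvEvAt text.toList pvMarkers) (List.range (text.toList.length + 1)))) = [] := by
      rw [List.filter_eq_nil_iff]
      intro e he
      have hnone := EV_find?_self text.toList pvMarkers k m hmem
      rw [hF] at hnone
      simp only [Option.map_none] at hnone
      rw [List.find?_eq_none] at hnone
      exact hnone e he
    rw [hfil, if_neg (by rw [hfind]; simp)]
    rfl
  | some sN =>
    obtain ⟨hsN, hpre, hmin⟩ := range_find?_some.mp hF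
    rw [decide_eq_true_eq] at hpre
    have hfind : PySem.Str.find text m = ((sN : ℕ) : Int) := by
      rw [PySem.Str.find_eq, chars_find_eq, hF]
    have hhead : (List.map (fun x => x.1) (List.filter (fun e => decide (e.2 = m))
        (List.flatMap (pvEvAt text.toList pvMarkers) (List.range (text.toList.length + 1))))).head?
        = some ((sN : ℕ) : Int) := by
      rw [List.head?_map, List.head?_filter, EV_find?_self text.toList pvMarkers k m hmem, hF]
      rfl
    cases hSL : (List.map (fun x => x.1) (List.filter (fun e => decide (e.2 = m))
        (List.flatMap (pvEvAt text.toList pvMarkers) (List.range (text.toList.length + 1))))) with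
    | nil => rw [hSL] at hhead; simp at hhead
    | cons s0 tail =>
      rw [hSL] at hhead
      simp only [List.head?_cons, Option.some_inj] at hhead
      subst hhead
      rw [if_pos (by rw [hfind]; omega)]
      have hthrle : sN + m.toList.length ≤ text.toList.length := by
        have h1 := hpre.length_le
        simp only [List.length_drop] at h1
        omega
      simp only [hfind, PySem.Str.len_eq, PySem.Str.findFrom_eq, ← Nat.cast_add]
      rw [A_fold text.toList m (sN + m.toList.length) hthrle pvMarkers text.toList.length le_rfl]
      rw [EV_find?_other text.toList pvMarkers m ((sN + m.toList.length : ℕ) : Int)]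
      have hcongr := range_find?_congr (N := text.toList.length + 1)
        (q1 := fun i => decide (((sN + m.toList.length : ℕ) : Int) ≤ ((i : ℕ) : Int)) &&
          pvOthOcc text.toList pvMarkers m i)
        (q2 := fun j => decide (sN + m.toList.length ≤ j) &&
          pvMarkers.any (fun km' => decide (km'.2 ≠ m) && decide (km'.2.toList <+: text.toList.drop j)))
        (fun j hj => by simp only [pvOthOcc]; congr 1; rw [decide_eq_decide]; omega)
      rw [hcongr]
      cases hE : (List.range (text.toList.length + 1)).find? (fun j => decide (sN + m.toList.length ≤ j) &&
          pvMarkers.any (fun km' => decide (km'.2 ≠ m) && decide (km'.2.toList <+: text.toList.drop j))) with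
      | none => simp [pvMinFind]
      | some j =>
        obtain ⟨hjN, _, _⟩ := range_find?_some.mp hE
        simp only [pvMinFind, Option.map_some, Option.getD_some]
        rw [min_eq_right (by omega)]

-- ===== VERDICT (by name: the statement is the Claim_ definition above) =====
theorem parse_components_py_spec : Claim_equal_parse_components_py := by
  intro text _
  unfold Spec_parse_components_py
  exact ab_eq text
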